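-- pv_equiv track=rewrite | github.com/AliK3112/tekken-8-movesets-scripts | decrypt_guide_footer_bnbPak.py | generate_key_i
-- ===== SOURCE A (Python) =====
-- MASK64 = 0xFFFFFFFFFFFFFFFF
--
-- MASK32 = 0xFFFFFFFF
--
-- def generate_key_i(initial_constant_param2):
--     magic_const = 0xedccfb96dca40fba
--     param_2 = initial_constant_param2 & MASK64
--     uVar5 = magic_const # Base value
--     rotate_count = param_2 & 0x1f
--     if rotate_count != 0:
--         for _ in range(rotate_count):
--             msb = (uVar5 >> 63) & 1
--             uVar5 = ((uVar5 << 1) | msb) & MASK64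
--
--     term1 = uVar5 & 0xffffffffffffffe0
--     uVar5_combined = (term1 ^ param_2 ^ 0x1d) & MASK64
--
--     uVar7 = 0
--     uVar6 = uVar5_combined & MASK32
--     uVar4 = 0
--     for _ in range(4):
--         uVar1 = magic_const
--         bVar2 = (uVar4 + 8) & 0xFF
--         if bVar2 != 0:
--             for _ in range(bVar2):
--                 msb = (uVar1 >> 63) & 1
--                 uVar1 = ((uVar1 << 1) | msb) & MASK64
--
--         uVar7 = (uVar7 ^ uVar1 ^ uVar6) & MASK64
--         uVar6 >>= 8
--         uVar4 += 8
--
--     # Final hash result, upper 32 bits of the 64-bit key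
--     hash_result_32 = uVar7 & MASK32
--     if hash_result_32 == 0:
--         hash_result_32 = 1
--
--     # Combine with lower 32 bits of uVar5_combined
--     result_64 = ((hash_result_32 << 32) | (uVar5_combined & MASK32)) & MASK64
--     return result_64
-- ===== SOURCE B (Python) =====
-- MASK64 = 0xFFFFFFFFFFFFFFFF
--
-- MASK32 = 0xFFFFFFFF
--
-- def _rol64(x, n):
--     n &= 63
--     return ((x << n) | (x >> (64 - n))) & MASK64
--
-- def generate_key_i(initial_constant_param2):
--     magic = 0xedccfb96dca40fba
--     p = initial_constant_param2 & MASK64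
--     combined = ((_rol64(magic, p & 0x1f) & 0xffffffffffffffe0) ^ p ^ 0x1d) & MASK64
--     low = combined & MASK32
--     h = 0
--     for i in range(4):
--         h = (h ^ _rol64(magic, 8 * i + 8) ^ (low >> (8 * i))) & MASK64
--     h &= MASK32
--     if h == 0:
--         h = 1
--     return ((h << 32) | low) & MASK64
-- ===== Notes on version B (the rewrite author's own statement) =====
-- stated objective: simpler
-- what changed: Both bit-by-bit rotation loops are replaced by one closed-form rol64 helper ((x<<n)|(x>>(sixty-four minus n)) masked to sixty-four bits), and the running uVar6 byte-shift state is replaced by reading each byte window directly as a shift of the low word, so B is a short straight-line computation with no inner loops.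
import Mathlib
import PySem

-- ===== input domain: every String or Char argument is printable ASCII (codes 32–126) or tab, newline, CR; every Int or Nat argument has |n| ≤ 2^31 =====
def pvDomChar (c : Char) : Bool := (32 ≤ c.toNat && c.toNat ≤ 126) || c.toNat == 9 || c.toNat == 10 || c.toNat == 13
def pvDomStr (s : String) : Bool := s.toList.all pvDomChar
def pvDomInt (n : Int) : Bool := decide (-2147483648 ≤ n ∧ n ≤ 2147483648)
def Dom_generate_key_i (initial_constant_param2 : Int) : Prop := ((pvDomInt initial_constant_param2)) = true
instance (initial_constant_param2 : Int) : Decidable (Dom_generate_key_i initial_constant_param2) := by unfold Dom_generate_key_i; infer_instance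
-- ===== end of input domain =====

-- B replaces A's two bit-by-bit rotation loops with one closed-form 64-bit rotate helper and
-- reads the four xor'ed byte windows directly as shifts of the low 32-bit word (objective: simpler).

-- ===== PORT A =====
-- one step of A's bit-by-bit left rotation: msb = (u >> 63) & 1; u = ((u << 1) | msb) & MASK64
def pvRotStep (u : Int) : Int :=
  PySem.Int.band (PySem.Int.bor (u <<< (1:Nat)) (PySem.Int.band (u >>> (63:Nat)) 1)) 0xFFFFFFFFFFFFFFFF

-- A's "if count != 0: for _ in range(count): <rotate one bit>" pattern (A uses it twice)
def pvRotLoop (count : Int) (x : Int) : Int :=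
  if count ≠ 0 then (List.range count.toNat).foldl (fun u _ => pvRotStep u) x else x

def generate_key_i (initial_constant_param2 : Int) : Int :=
  let magic_const : Int := 0xedccfb96dca40fba
  let param_2 := PySem.Int.band initial_constant_param2 0xFFFFFFFFFFFFFFFF
  let rotate_count := PySem.Int.band param_2 0x1f
  let uVar5 := pvRotLoop rotate_count magic_const
  let term1 := PySem.Int.band uVar5 0xffffffffffffffe0
  let uVar5_combined := PySem.Int.band (PySem.Int.bxor (PySem.Int.bxor term1 param_2) 0x1d) 0xFFFFFFFFFFFFFFFF
  -- state (uVar7, uVar6, uVar4); 'for _ in range(4)'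
  let fin := (List.range 4).foldl
    (fun (s : Int × Int × Int) _ =>
      let uVar1 := pvRotLoop (PySem.Int.band (s.2.2 + 8) 0xFF) magic_const
      (PySem.Int.band (PySem.Int.bxor (PySem.Int.bxor s.1 uVar1) s.2.1) 0xFFFFFFFFFFFFFFFF,
       s.2.1 >>> (8:Nat), s.2.2 + 8))
    (0, PySem.Int.band uVar5_combined 0xFFFFFFFF, 0)
  let hash_result_32 := PySem.Int.band fin.1 0xFFFFFFFF
  let hash_result_32 := if hash_result_32 = 0 then 1 else hash_result_32
  PySem.Int.band (PySem.Int.bor (hash_result_32 <<< (32:Nat)) (PySem.Int.band uVar5_combined 0xFFFFFFFF)) 0xFFFFFFFFFFFFFFFF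

-- ===== PORT B =====
-- B's closed-form rotate-left of a 64-bit value (_rol64); shift amounts are Nat as in Python (n & 63 ≥ 0)
def pvRol64 (x m : Int) : Int :=
  let n := PySem.Int.band m 63
  PySem.Int.band (PySem.Int.bor (x <<< n.toNat) (x >>> ((64 - n).toNat))) 0xFFFFFFFFFFFFFFFF

def generate_key_i_alt (initial_constant_param2 : Int) : Int :=
  let magic : Int := 0xedccfb96dca40fba
  let p := PySem.Int.band initial_constant_param2 0xFFFFFFFFFFFFFFFF
  let combined := PySem.Int.band (PySem.Int.bxor (PySem.Int.bxor
      (PySem.Int.band (pvRol64 magic (PySem.Int.band p 0x1f)) 0xffffffffffffffe0) p) 0x1d) 0xFFFFFFFFFFFFFFFF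
  let low := PySem.Int.band combined 0xFFFFFFFF
  -- 'for i in range(4)'
  let h := (List.range 4).foldl
    (fun (h : Int) (i : Nat) =>
      PySem.Int.band (PySem.Int.bxor (PySem.Int.bxor h (pvRol64 magic (8 * (i : Int) + 8))) (low >>> (8 * i))) 0xFFFFFFFFFFFFFFFF)
    0
  let h := PySem.Int.band h 0xFFFFFFFF
  let h := if h = 0 then 1 else h
  PySem.Int.band (PySem.Int.bor (h <<< (32:Nat)) low) 0xFFFFFFFFFFFFFFFF

-- ===== PRECONDITION & SPEC =====
def Spec_generate_key_i (initial_constant_param2 : Int) (out : Int) : Prop := out = generate_key_i_alt initial_constant_param2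
instance (initial_constant_param2 : Int) (out : Int) : Decidable (Spec_generate_key_i initial_constant_param2 out) := by unfold Spec_generate_key_i; infer_instance

-- ===== CLAIM (what is proved, stated in full; the proofs are below) =====
def Claim_equal_generate_key_i : Prop := ∀ (initial_constant_param2 : Int), Dom_generate_key_i initial_constant_param2 → Spec_generate_key_i initial_constant_param2 (generate_key_i initial_constant_param2)

-- ===== LEMMAS AND PROOFS =====

-- A's bit-by-bit rotation loop agrees with B's closed-form rotate for every count below 32
set_option maxRecDepth 10000 in
theorem pvRotLoop_eq_rol64 : ∀ k : Nat, k < 32 →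
    pvRotLoop (k : Int) 0xedccfb96dca40fba = pvRol64 0xedccfb96dca40fba (k : Int) := by decide

theorem pvShr_zero (a : Int) : a >>> (0:Nat) = a := by
  simp only [Int.shiftRight_eq_div_pow]; norm_num

theorem pvShr_shr (a : Int) (m n : Nat) : a >>> m >>> n = a >>> (m + n) := by
  simp only [Int.shiftRight_eq_div_pow]
  rw [Int.ediv_ediv_of_nonneg (by positivity), pow_add]
  push_cast; ring_nf

-- ===== VERDICT (by name: the statement is the Claim_ definition above) =====
set_option maxRecDepth 10000 in
theorem generate_key_i_spec : Claim_equal_generate_key_i := by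
  intro n _
  unfold Spec_generate_key_i
  simp only [generate_key_i, generate_key_i_alt, List.range_succ, List.range_zero,
    List.foldl_append, List.foldl_cons, List.foldl_nil]
  have hp0 : (0:Int) ≤ PySem.Int.band n 0xFFFFFFFFFFFFFFFF := by
    rw [PySem.Int.band_comm]
    exact PySem.Int.band_nonneg_of_nonneg_left n (by norm_num)
  set p := PySem.Int.band n 0xFFFFFFFFFFFFFFFF with hp
  have hrc0 : (0:Int) ≤ PySem.Int.band p 0x1f := by
    rw [PySem.Int.band_comm]
    exact PySem.Int.band_nonneg_of_nonneg_left p (by norm_num)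
  have hrclt : PySem.Int.band p 0x1f < 32 := by
    rw [PySem.Int.band_of_nonneg hp0 (by norm_num)]
    have h := Nat.and_le_right (n := p.toNat) (m := 31)
    exact_mod_cast by omega
  set rc := PySem.Int.band p 0x1f with hrc
  have hrot : pvRotLoop rc 0xedccfb96dca40fba = pvRol64 0xedccfb96dca40fba rc := by
    have := pvRotLoop_eq_rol64 rc.toNat (by omega)
    rwa [Int.toNat_of_nonneg hrc0] at this
  rw [hrot]
  set combined := PySem.Int.band (PySem.Int.bxor (PySem.Int.bxor
      (PySem.Int.band (pvRol64 0xedccfb96dca40fba rc) 0xffffffffffffffe0) p) 0x1d) 0xFFFFFFFFFFFFFFFF with hcomb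
  set low := PySem.Int.band combined 0xFFFFFFFF with hlow
  have e1 : pvRotLoop (PySem.Int.band ((0:Int) + 8) 255) 0xedccfb96dca40fba = 0xccfb96dca40fbaed := by decide
  have e2 : pvRotLoop (PySem.Int.band ((0:Int) + 8 + 8) 255) 0xedccfb96dca40fba = 0xfb96dca40fbaedcc := by decide
  have e3 : pvRotLoop (PySem.Int.band ((0:Int) + 8 + 8 + 8) 255) 0xedccfb96dca40fba = 0x96dca40fbaedccfb := by decide
  have e4 : pvRotLoop (PySem.Int.band ((0:Int) + 8 + 8 + 8 + 8) 255) 0xedccfb96dca40fba = 0xdca40fbaedccfb96 := by decide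
  have f1 : pvRol64 0xedccfb96dca40fba (8 * (((0:Nat)):Int) + 8) = 0xccfb96dca40fbaed := by decide
  have f2 : pvRol64 0xedccfb96dca40fba (8 * (((1:Nat)):Int) + 8) = 0xfb96dca40fbaedcc := by decide
  have f3 : pvRol64 0xedccfb96dca40fba (8 * (((2:Nat)):Int) + 8) = 0x96dca40fbaedccfb := by decide
  have f4 : pvRol64 0xedccfb96dca40fba (8 * (((3:Nat)):Int) + 8) = 0xdca40fbaedccfb96 := by decide
  rw [e1, e2, e3, e4, f1, f2, f3, f4]
  simp only [pvShr_shr]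
  norm_num [pvShr_zero]
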